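-- pv_equiv track=rewrite | github.com/AhnHongchan/algorithm_python | 2382. 미생물 격리.py | number_of_microbiome
-- ===== SOURCE A (Python) =====
-- def number_of_microbiome(N, M, K, mc_map):
--     # 상 하 좌 우
--     dx = [-1, 1, 0, 0]
--     dy = [0, 0, -1, 1]
--
--     # 초기 군집 정보 설정
--     for _ in range(M):
--         # 각 시간마다의 이동을 처리
--         new_map = {}
--
--         for i in range(len(mc_map)):
--             x, y, microbes, direction = mc_map[i]
--             # 새로운 위치로 이동
--             nx, ny = x + dx[direction - 1], y + dy[direction - 1]
--
--             # 약품이 칠해진 셀에 도착한 경우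
--             if nx == 0 or nx == N - 1 or ny == 0 or ny == N - 1:
--                 microbes //= 2  # 미생물 수 절반으로 감소
--                 direction = direction - 1 if direction % 2 == 0 else direction + 1  # 방향 반전
--
--             # 군집이 사라진 경우 (미생물 수가 0이 된 경우)
--             if microbes == 0:
--                 continue
--
--             # 새로운 위치에 이미 다른 군집이 있는 경우 합침
--             if (nx, ny) in new_map:
--                 new_map[(nx, ny)].append((microbes, direction))
--             else:
--                 new_map[(nx, ny)] = [(microbes, direction)]
--
--         # 병합 후 새로운 상태 업데이트
--         mc_map = []
--         for key, value in new_map.items():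
--             if len(value) > 1:  # 여러 군집이 모인 경우
--                 # 미생물 수가 가장 많은 방향으로 합쳐짐
--                 total_microbes = sum(v[0] for v in value)
--                 max_microbes, max_direction = max(value)
--                 mc_map.append([key[0], key[1], total_microbes, max_direction])
--             else:
--                 mc_map.append([key[0], key[1], value[0][0], value[0][1]])
--
--     # M 시간이 지난 후 남아 있는 모든 미생물 수의 합 계산
--     return sum(group[2] for group in mc_map)
-- ===== SOURCE B (Python) =====
-- def number_of_microbiome(N, M, K, mc_map):
--     # no dict: each step is staged as flat passes over an arrival list
--     dx = (-1, 1, 0, 0)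
--     dy = (0, 0, -1, 1)
--     for _ in range(M):
--         # pass 1: move every colony, halve/flip at medicine cells, drop empty ones
--         moved = []
--         for x, y, m, d in mc_map:
--             nx, ny = x + dx[d - 1], y + dy[d - 1]
--             if nx == 0 or nx == N - 1 or ny == 0 or ny == N - 1:
--                 m //= 2
--                 d = d - 1 if d % 2 == 0 else d + 1
--             if m:
--                 moved.append(((nx, ny), m, d))
--         # pass 2: cells in first-appearance order, by linear membership scans
--         cells = []
--         for c, m, d in moved:
--             if c not in cells:
--                 cells.append(c)
--         # pass 3: per cell, total and best (microbes, direction) by rescanning moved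
--         mc_map = [[cx, cy,
--                    sum(m for c, m, d in moved if c == (cx, cy)),
--                    max((m, d) for c, m, d in moved if c == (cx, cy))[1]]
--                   for cx, cy in cells]
--     return sum(g[2] for g in mc_map)
-- ===== Notes on version B (the rewrite author's own statement) =====
-- stated objective: alternative
-- what changed: A groups each step's arrivals into a dict of per-cell lists while iterating and then reduces each list with sum()/max(); B uses no dict at all: it stages each step as three flat passes - build the arrival list, collect cells in first-appearance order by linear membership scans, then compute each cell's total and best (microbes,direction) by rescanning the arrival list - trading A's hash grouping for plain list scans.
import Mathlib
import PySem

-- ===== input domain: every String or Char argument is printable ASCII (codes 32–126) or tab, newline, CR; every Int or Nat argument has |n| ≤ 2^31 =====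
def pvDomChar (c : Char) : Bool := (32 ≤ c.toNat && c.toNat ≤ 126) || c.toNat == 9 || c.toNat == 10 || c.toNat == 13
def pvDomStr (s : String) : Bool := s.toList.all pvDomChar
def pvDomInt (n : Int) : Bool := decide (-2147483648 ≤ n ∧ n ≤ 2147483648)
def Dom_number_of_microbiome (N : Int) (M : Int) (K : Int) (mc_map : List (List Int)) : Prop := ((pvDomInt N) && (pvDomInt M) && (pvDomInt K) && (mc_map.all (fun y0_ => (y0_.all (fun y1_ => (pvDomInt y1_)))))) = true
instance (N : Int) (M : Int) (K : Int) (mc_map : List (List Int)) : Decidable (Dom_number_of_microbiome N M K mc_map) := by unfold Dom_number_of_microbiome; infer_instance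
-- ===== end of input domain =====

-- B removes A's dict of per-cell arrival lists entirely: each step is staged passes over a
-- flat arrival list (move+filter, collect cells in first-appearance order, rescan per cell
-- for total and best direction); objective: alternative (plainer, but quadratic per step).

-- ===== PORT A =====
-- dx/dy movement tables
def pvDx : List Int := [-1, 1, 0, 0]
def pvDy : List Int := [0, 0, -1, 1]

-- Python tuple comparison '(a1, a2) < (b1, b2)' (lexicographic), used by both max() ports
def pvLtPair (a b : Int × Int) : Bool := a.1 < b.1 || (a.1 == b.1 && a.2 < b.2)

-- Python's max over a nonempty list of pairs, ported by hand as the running strict-max scan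
-- (exact: max keeps the first maximal element); [] is unreachable (dict values / groups are nonempty)
def pvMaxA (l : List (Int × Int)) : Int × Int :=
  match l with
  | [] => ((0 : Int), (0 : Int))
  | h :: t => t.foldl (fun b p => if pvLtPair b p then p else b) h

-- the move/halve/flip part of A's loop body; 'continue' on microbes == 0 becomes none;
-- a row that is not [x, y, microbes, direction] raises ValueError in Python — excluded by Pre_
def pvMoveA (N : Int) (row : List Int) : Option ((Int × Int) × Int × Int) :=
  match row with
  | [x, y, microbes0, direction0] =>
    let nx := x + PySem.List.pyGetD pvDx (direction0 - 1) 0   -- dx[direction-1]; IndexError excluded by Pre_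
    let ny := y + PySem.List.pyGetD pvDy (direction0 - 1) 0
    let hit := nx == 0 || nx == N - 1 || ny == 0 || ny == N - 1
    let microbes := if hit then PySem.Int.floordiv microbes0 2 else microbes0
    let direction := if hit then (if PySem.Int.mod direction0 2 == 0 then direction0 - 1 else direction0 + 1) else direction0
    if microbes == 0 then none else some ((nx, ny), microbes, direction)
  | _ => none

-- body of A's inner loop: move one colony and append it to its cell's list of arrivals
def pvRowA (N : Int) (nm : PySem.Dict (Int × Int) (List (Int × Int))) (row : List Int) :
    PySem.Dict (Int × Int) (List (Int × Int)) :=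
  match pvMoveA N row with
  | none => nm
  | some (k, v) => if nm.contains k then nm.modify k [] (· ++ [v]) else nm.insert k [v]

-- one time step of A: group arrivals per cell in a dict of lists, then a second pass reduces
-- each multi-colony list with sum(...) and max(...)
def pvStepA (N : Int) (mc : List (List Int)) : List (List Int) :=
  (mc.foldl (pvRowA N) PySem.Dict.empty).items.map (fun kv =>
    if 1 < kv.2.length then
      [kv.1.1, kv.1.2, (kv.2.map (·.1)).sum, (pvMaxA kv.2).2]
    else
      [kv.1.1, kv.1.2, (PySem.List.pyGetD kv.2 0 (0, 0)).1, (PySem.List.pyGetD kv.2 0 (0, 0)).2])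

-- 'for _ in range(M)'
def pvLoopA (N : Int) : Nat → List (List Int) → List (List Int)
  | 0, mc => mc
  | Nat.succ n, mc => pvLoopA N n (pvStepA N mc)

def number_of_microbiome (N : Int) (M : Int) (K : Int) (mc_map : List (List Int)) : Int :=
  ((pvLoopA N M.toNat mc_map).map (fun g => PySem.List.pyGetD g 2 0)).sum

-- ===== PORT B =====
-- B's move/halve/flip logic ('if m:' keeps nonzero colonies); unpacking a row that is not
-- 4 fields raises ValueError in Python — excluded by Pre_
def pvMoveB (N : Int) (row : List Int) : Option ((Int × Int) × Int × Int) :=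
  match row with
  | [x, y, m0, d0] =>
    let nx := x + PySem.List.pyGetD pvDx (d0 - 1) 0
    let ny := y + PySem.List.pyGetD pvDy (d0 - 1) 0
    let hit := nx == 0 || nx == N - 1 || ny == 0 || ny == N - 1
    let m := if hit then PySem.Int.floordiv m0 2 else m0
    let d := if hit then (if PySem.Int.mod d0 2 == 0 then d0 - 1 else d0 + 1) else d0
    if m == 0 then none else some ((nx, ny), m, d)
  | _ => none

-- pass 1: the flat arrival list ((nx, ny), m, d)
def pvMovedB (N : Int) (mc : List (List Int)) : List ((Int × Int) × Int × Int) :=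
  mc.foldl (fun acc row => match pvMoveB N row with | none => acc | some a => acc ++ [a]) []

-- pass 2: cells in first-appearance order by linear membership scans ('if c not in cells')
def pvCellsB (moved : List ((Int × Int) × Int × Int)) : List (Int × Int) :=
  moved.foldl (fun cs t => if cs.contains t.1 then cs else cs ++ [t.1]) []

-- Python's max over a nonempty generator, hand-ported as the running strict-max scan
def pvMaxB (l : List (Int × Int)) : Int × Int :=
  match l with
  | [] => ((0 : Int), (0 : Int))
  | h :: t => t.foldl (fun b p => if pvLtPair b p then p else b) h

-- pass 3: per cell, total and best (microbes, direction) by rescanning the arrival list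
def pvStepB (N : Int) (mc : List (List Int)) : List (List Int) :=
  let moved := pvMovedB N mc
  (pvCellsB moved).map (fun c =>
    [c.1, c.2,
     ((moved.filter (fun t => t.1 == c)).map (fun t => t.2.1)).sum,
     (pvMaxB ((moved.filter (fun t => t.1 == c)).map (fun t => t.2))).2])

def pvLoopB (N : Int) : Nat → List (List Int) → List (List Int)
  | 0, mc => mc
  | Nat.succ n, mc => pvLoopB N n (pvStepB N mc)

def number_of_microbiome_alt (N : Int) (M : Int) (K : Int) (mc_map : List (List Int)) : Int :=
  ((pvLoopB N M.toNat mc_map).map (fun g => PySem.List.pyGetD g 2 0)).sum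

-- ===== PRECONDITION & SPEC =====
-- Pre_ marks exactly the inputs where Python A returns: with M ≤ 0 the loop body never runs and
-- only group[2] is read (IndexError on a row shorter than 3); with 0 < M every row must unpack
-- into exactly 4 fields and its direction must lie in -3..4 — any other direction indexes
-- dx[direction-1] outside -4..3 (IndexError) at the first step, while -3..4 is closed under the
-- direction flip, so no later step can raise. (The ports are total and proved equal on all of
-- Dom_; Pre_'s only role is to mark where the real Python raises instead of returning.)
def Pre_number_of_microbiome (N : Int) (M : Int) (K : Int) (mc_map : List (List Int)) : Prop :=
  ∀ row ∈ mc_map,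
    (M ≤ 0 → 3 ≤ row.length) ∧
    (0 < M → row.length = 4 ∧ -3 ≤ row.getD 3 0 ∧ row.getD 3 0 ≤ 4)
instance (N : Int) (M : Int) (K : Int) (mc_map : List (List Int)) : Decidable (Pre_number_of_microbiome N M K mc_map) := by unfold Pre_number_of_microbiome; infer_instance

def pvWitness_number_of_microbiome : Int × Int × Int × List (List Int) :=
  (7, 2, 3, [[3, 3, 8, 1], [2, 3, 5, 4]])

def Spec_number_of_microbiome (N : Int) (M : Int) (K : Int) (mc_map : List (List Int)) (out : Int) : Prop := out = number_of_microbiome_alt N M K mc_map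
instance (N : Int) (M : Int) (K : Int) (mc_map : List (List Int)) (out : Int) : Decidable (Spec_number_of_microbiome N M K mc_map out) := by unfold Spec_number_of_microbiome; infer_instance

-- ===== CLAIM (what is proved, stated in full; the proofs are below) =====
def Claim_equal_number_of_microbiome : Prop := ∀ (N : Int) (M : Int) (K : Int) (mc_map : List (List Int)), Dom_number_of_microbiome N M K mc_map → Pre_number_of_microbiome N M K mc_map → Spec_number_of_microbiome N M K mc_map (number_of_microbiome N M K mc_map)

-- ===== LEMMAS AND PROOFS =====

-- the two move helpers are syntactically the same function
theorem pvMove_eq : pvMoveB = pvMoveA := rfl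

-- B's pass-1 fold builds exactly the filterMap of the move function
theorem pvMovedB_eq_filterMap (N : Int) (mc : List (List Int)) :
    pvMovedB N mc = mc.filterMap (pvMoveA N) := by
  have h : ∀ (acc : List ((Int × Int) × Int × Int)),
      mc.foldl (fun acc row => match pvMoveB N row with | none => acc | some a => acc ++ [a]) acc
        = acc ++ mc.filterMap (pvMoveB N) := by
    induction mc with
    | nil => intro acc; simp
    | cons r rs ih =>
      intro acc
      cases h : pvMoveB N r with
      | none => simp [List.filterMap_cons, h, ih]
      | some a => simp [List.filterMap_cons, h, ih]
  rw [pvMovedB, h, pvMove_eq]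
  simp

-- A's dict fold over the rows is the canonical grouping fold over the arrival list
theorem pvFoldA_eq (N : Int) (mc : List (List Int))
    (d : PySem.Dict (Int × Int) (List (Int × Int))) :
    mc.foldl (pvRowA N) d =
      (mc.filterMap (pvMoveA N)).foldl (fun d p => d.modify p.1 [] (· ++ [p.2])) d := by
  induction mc generalizing d with
  | nil => rfl
  | cons r rs ih =>
    cases h : pvMoveA N r with
    | none => simp [List.filterMap_cons, h, List.foldl_cons, pvRowA, ih]
    | some a =>
      have hrow : pvRowA N d r = d.modify a.1 [] (· ++ [a.2]) := by
        rw [pvRowA, h]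
        by_cases hc : d.contains a.1 = true
        · simp [hc]
        · have hc' : d.contains a.1 = false := by simpa using hc
          rw [PySem.Dict.modify]
          have hg : PySem.Dict.getD d a.1 ([] : List (Int × Int)) = [] :=
            PySem.Dict.getD_of_not_contains _ _ hc'
          rw [hg]
          simp [hc']
      simp [List.filterMap_cons, h, List.foldl_cons, hrow, ih]

-- items of the grouping fold: first-occurrence cells, each with its filtered arrivals
theorem pvItemsA (L : List ((Int × Int) × Int × Int)) :
    (L.foldl (fun d p => d.modify p.1 [] (· ++ [p.2])) PySem.Dict.empty).items =
      (PySem.Set.ofList (L.map (·.1))).map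
        (fun k => (k, (L.filter (fun p => p.1 == k)).map (·.2))) := by
  set d := L.foldl (fun d p => d.modify p.1 [] (· ++ [p.2])) PySem.Dict.empty with hd
  have hkeys : d.keys = PySem.Set.ofList (L.map (·.1)) := by
    rw [hd, PySem.Dict.keys_foldl_modify_key]
    simp [PySem.Set.update_nil_left]
  have hnd : d.keys.Nodup := by rw [hkeys]; exact PySem.Set.nodup_ofList _
  rw [PySem.Dict.items_eq_map_keys d hnd [], hkeys]
  apply List.map_congr_left
  intro k _
  rw [hd, PySem.Dict.getD_foldl_modify_append]
  simp

-- B's cells pass is ordered dedup of the arrival cells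
theorem pvCellsB_eq (moved : List ((Int × Int) × Int × Int)) :
    pvCellsB moved = PySem.Set.ofList (moved.map (·.1)) := by
  rw [← PySem.Set.update_nil_left, PySem.Set.update_map_eq_foldl_add, pvCellsB]
  have : (fun (cs : List (Int × Int)) (t : (Int × Int) × Int × Int) =>
      if cs.contains t.1 then cs else cs ++ [t.1]) =
      fun s t => PySem.Set.add s t.1 := by
    funext cs t
    simp [PySem.Set.add]
  rw [this]

-- one step of A equals one step of B
theorem pvStep_eq (N : Int) (mc : List (List Int)) : pvStepA N mc = pvStepB N mc := by
  rw [pvStepA, pvStepB, pvFoldA_eq, pvItemsA, List.map_map,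
    pvMovedB_eq_filterMap, pvCellsB_eq]
  apply List.map_congr_left
  intro k hk
  have hne : (List.filterMap (pvMoveA N) mc).filter (fun p => p.1 == k) ≠ [] := by
    rw [PySem.Set.mem_ofList] at hk
    obtain ⟨t, ht, hk1⟩ := List.mem_map.mp hk
    intro hnil
    have : t ∈ (List.filterMap (pvMoveA N) mc).filter (fun p => p.1 == k) :=
      List.mem_filter.mpr ⟨ht, by simp [hk1]⟩
    rw [hnil] at this
    exact absurd this (List.not_mem_nil)
  cases hv : (List.filterMap (pvMoveA N) mc).filter (fun p => p.1 == k) with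
  | nil => exact absurd hv hne
  | cons t tl =>
    cases tl with
    | nil => simp [hv, pvMaxA, pvMaxB, PySem.List.pyGetD, PySem.List.pyGet?, PySem.List.pyIdx?]
    | cons t2 tl2 => simp [hv, pvMaxA, pvMaxB, List.map_map, Function.comp_def]

theorem pvLoop_eq (N : Int) (n : Nat) (mc : List (List Int)) :
    pvLoopA N n mc = pvLoopB N n mc := by
  induction n generalizing mc with
  | zero => rfl
  | succ k ih => simp [pvLoopA, pvLoopB, pvStep_eq, ih]

-- ===== VERDICT (by name: the statement is the Claim_ definition above) =====
theorem number_of_microbiome_spec : Claim_equal_number_of_microbiome := by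
  intro N M K mc_map _ _
  unfold Spec_number_of_microbiome number_of_microbiome number_of_microbiome_alt
  rw [pvLoop_eq]
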